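-- pv_equiv track=rewrite | github.com/alexanderlipovics-cell/salesflow-ai | salesflow-app/src/backend/app/services/csv_import/parser.py | detect_company
-- ===== SOURCE A (Python) =====
-- from typing import List, Dict, Optional, Any
-- from enum import Enum
--
-- class MLMCompany(str, Enum):
--     """MLM-Unternehmen."""
--     ZINZINO = "zinzino"
--     PM_INTERNATIONAL = "pm-international"
--     DOTERRA = "doterra"
--     HERBALIFE = "herbalife"
--     LR = "lr"
--     VORWERK = "vorwerk"
--     GENERIC = "generic"
--
-- def detect_company(headers: List[str]) -> MLMCompany:
--     """Erkennt MLM-Unternehmen basierend auf Headers."""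
--     headers_lower = [h.lower() for h in headers]
--
--     # ZINZINO: Partner ID, Vorname, Nachname, Email, Telefon, Rang, Credits, Sponsor ID, Z4F
--     if any('partner id' in h or 'partnerid' in h for h in headers_lower):
--         if any('credits' in h or 'z4f' in h for h in headers_lower):
--             return MLMCompany.ZINZINO
--
--     # PM-International: Partner-Nr, Vorname, Nachname, Email, Telefon, Rang, Punkte, GV, Erstlinie, Sponsor, Autoship
--     if any('partner-nr' in h or 'partner nr' in h or 'partnernr' in h for h in headers_lower):
--         if any('punkte' in h or 'points' in h or 'p' in h for h in headers_lower):
--             return MLMCompany.PM_INTERNATIONAL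
--     if any('pm' in h and 'international' in h for h in headers_lower):
--         return MLMCompany.PM_INTERNATIONAL
--
--     # doTERRA: Vorname, Nachname, Email, Telefon, Rank, OV
--     if any('rank' in h for h in headers_lower):
--         if any('ov' in h or 'organization' in h for h in headers_lower):
--             return MLMCompany.DOTERRA
--
--     # Herbalife: Name, ID, Sponsor, Level, VP, PP
--     if any('sponsor' in h for h in headers_lower):
--         if any('vp' in h or 'pp' in h for h in headers_lower):
--             return MLMCompany.HERBALIFE
--
--     # LR: Ähnlich wie Herbalife
--     if any('lr' in h for h in headers_lower):
--         return MLMCompany.LR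
--
--     # Vorwerk: Ähnlich wie PM-International
--     if any('vorwerk' in h for h in headers_lower):
--         return MLMCompany.VORWERK
--
--     return MLMCompany.GENERIC
-- ===== SOURCE B (Python) =====
-- from typing import List
-- from enum import Enum
--
-- class MLMCompany(str, Enum):
--     """MLM-Unternehmen."""
--     ZINZINO = "zinzino"
--     PM_INTERNATIONAL = "pm-international"
--     DOTERRA = "doterra"
--     HERBALIFE = "herbalife"
--     LR = "lr"
--     VORWERK = "vorwerk"
--     GENERIC = "generic"
--
-- def detect_company(headers: List[str]) -> MLMCompany:
--     """Erkennt MLM-Unternehmen basierend auf Headers."""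
--     # One pass: compute boolean feature flags, then a pure flag-driven decision.
--     partner_id = credits = partner_nr = has_p = pm_intl = False
--     rank = ov = sponsor = vp_pp = lr = vorwerk = False
--     for h in headers:
--         hl = h.lower()
--         partner_id = partner_id or 'partner id' in hl or 'partnerid' in hl
--         credits = credits or 'credits' in hl or 'z4f' in hl
--         partner_nr = partner_nr or 'partner-nr' in hl or 'partner nr' in hl or 'partnernr' in hl
--         has_p = has_p or 'p' in hl  # 'punkte' and 'points' both contain 'p'
--         pm_intl = pm_intl or ('pm' in hl and 'international' in hl)
--         rank = rank or 'rank' in hl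
--         ov = ov or 'ov' in hl or 'organization' in hl
--         sponsor = sponsor or 'sponsor' in hl
--         vp_pp = vp_pp or 'vp' in hl or 'pp' in hl
--         lr = lr or 'lr' in hl
--         vorwerk = vorwerk or 'vorwerk' in hl
--     if partner_id and credits:
--         return MLMCompany.ZINZINO
--     if (partner_nr and has_p) or pm_intl:
--         return MLMCompany.PM_INTERNATIONAL
--     if rank and ov:
--         return MLMCompany.DOTERRA
--     if sponsor and vp_pp:
--         return MLMCompany.HERBALIFE
--     if lr:
--         return MLMCompany.LR
--     if vorwerk:
--         return MLMCompany.VORWERK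
--     return MLMCompany.GENERIC
-- ===== Notes on version B (the rewrite author's own statement) =====
-- stated objective: alternative
-- what changed: A's sequence of repeated any()-scans with nested early returns is replaced by a single pass over the headers that accumulates boolean feature flags, followed by a pure flag-driven decision; the 'punkte'/'points'/'p' disjunction collapses to the 'p' substring test and the two PM-International branches are merged into one.
import Mathlib
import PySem

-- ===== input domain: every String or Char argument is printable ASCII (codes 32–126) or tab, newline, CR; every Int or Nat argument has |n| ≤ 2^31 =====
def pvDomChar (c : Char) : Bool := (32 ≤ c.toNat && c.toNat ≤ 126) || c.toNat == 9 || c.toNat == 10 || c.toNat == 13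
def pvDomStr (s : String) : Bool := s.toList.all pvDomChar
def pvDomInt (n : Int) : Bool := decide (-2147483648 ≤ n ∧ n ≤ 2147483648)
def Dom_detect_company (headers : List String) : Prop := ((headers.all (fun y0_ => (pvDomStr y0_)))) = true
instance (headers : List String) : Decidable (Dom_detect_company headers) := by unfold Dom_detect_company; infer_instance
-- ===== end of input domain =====

-- B replaces A's repeated any-scans with one pass computing boolean feature flags and a
-- flag-driven decision (objective: alternative decomposition; same asymptotic cost).

-- ===== PORT A =====
def detect_company (headers : List String) : String :=
  let headers_lower := headers.map PySem.Str.lower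
  if headers_lower.any (fun h => PySem.Str.isIn "partner id" h || PySem.Str.isIn "partnerid" h) &&
     headers_lower.any (fun h => PySem.Str.isIn "credits" h || PySem.Str.isIn "z4f" h) then "zinzino"
  else if headers_lower.any (fun h => PySem.Str.isIn "partner-nr" h || PySem.Str.isIn "partner nr" h || PySem.Str.isIn "partnernr" h) &&
          headers_lower.any (fun h => PySem.Str.isIn "punkte" h || PySem.Str.isIn "points" h || PySem.Str.isIn "p" h) then "pm-international"
  else if headers_lower.any (fun h => PySem.Str.isIn "pm" h && PySem.Str.isIn "international" h) then "pm-international"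
  else if headers_lower.any (fun h => PySem.Str.isIn "rank" h) &&
          headers_lower.any (fun h => PySem.Str.isIn "ov" h || PySem.Str.isIn "organization" h) then "doterra"
  else if headers_lower.any (fun h => PySem.Str.isIn "sponsor" h) &&
          headers_lower.any (fun h => PySem.Str.isIn "vp" h || PySem.Str.isIn "pp" h) then "herbalife"
  else if headers_lower.any (fun h => PySem.Str.isIn "lr" h) then "lr"
  else if headers_lower.any (fun h => PySem.Str.isIn "vorwerk" h) then "vorwerk"
  else "generic"

-- ===== PORT B =====
structure DCFlags where
  partnerId : Bool
  credits : Bool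
  partnerNr : Bool
  hasP : Bool
  pmIntl : Bool
  rank : Bool
  ov : Bool
  sponsor : Bool
  vpPp : Bool
  lr : Bool
  vorwerk : Bool
deriving Repr, DecidableEq

def dcStep (f : DCFlags) (h : String) : DCFlags :=
  let hl := PySem.Str.lower h
  { partnerId := f.partnerId || PySem.Str.isIn "partner id" hl || PySem.Str.isIn "partnerid" hl
    credits := f.credits || PySem.Str.isIn "credits" hl || PySem.Str.isIn "z4f" hl
    partnerNr := f.partnerNr || PySem.Str.isIn "partner-nr" hl || PySem.Str.isIn "partner nr" hl || PySem.Str.isIn "partnernr" hl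
    hasP := f.hasP || PySem.Str.isIn "p" hl
    pmIntl := f.pmIntl || (PySem.Str.isIn "pm" hl && PySem.Str.isIn "international" hl)
    rank := f.rank || PySem.Str.isIn "rank" hl
    ov := f.ov || PySem.Str.isIn "ov" hl || PySem.Str.isIn "organization" hl
    sponsor := f.sponsor || PySem.Str.isIn "sponsor" hl
    vpPp := f.vpPp || PySem.Str.isIn "vp" hl || PySem.Str.isIn "pp" hl
    lr := f.lr || PySem.Str.isIn "lr" hl
    vorwerk := f.vorwerk || PySem.Str.isIn "vorwerk" hl }

def detect_company_alt (headers : List String) : String :=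
  let f := headers.foldl dcStep ⟨false, false, false, false, false, false, false, false, false, false, false⟩
  if f.partnerId && f.credits then "zinzino"
  else if (f.partnerNr && f.hasP) || f.pmIntl then "pm-international"
  else if f.rank && f.ov then "doterra"
  else if f.sponsor && f.vpPp then "herbalife"
  else if f.lr then "lr"
  else if f.vorwerk then "vorwerk"
  else "generic"

-- ===== PRECONDITION & SPEC =====
def Spec_detect_company (headers : List String) (out : String) : Prop := out = detect_company_alt headers
instance (headers : List String) (out : String) : Decidable (Spec_detect_company headers out) := by unfold Spec_detect_company; infer_instance

-- ===== CLAIM (what is proved, stated in full; the proofs are below) =====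
def Claim_equal_detect_company : Prop := ∀ (headers : List String), Dom_detect_company headers → Spec_detect_company headers (detect_company headers)

-- ===== LEMMAS AND PROOFS =====

/-- The fold of `dcStep` computes, in each field, the disjunction of the field's
    per-header predicate over all headers. -/
theorem dcFold (hs : List String) (f : DCFlags) :
    hs.foldl dcStep f =
      { partnerId := f.partnerId || hs.any (fun h => PySem.Str.isIn "partner id" (PySem.Str.lower h) || PySem.Str.isIn "partnerid" (PySem.Str.lower h))
        credits := f.credits || hs.any (fun h => PySem.Str.isIn "credits" (PySem.Str.lower h) || PySem.Str.isIn "z4f" (PySem.Str.lower h))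
        partnerNr := f.partnerNr || hs.any (fun h => PySem.Str.isIn "partner-nr" (PySem.Str.lower h) || PySem.Str.isIn "partner nr" (PySem.Str.lower h) || PySem.Str.isIn "partnernr" (PySem.Str.lower h))
        hasP := f.hasP || hs.any (fun h => PySem.Str.isIn "p" (PySem.Str.lower h))
        pmIntl := f.pmIntl || hs.any (fun h => PySem.Str.isIn "pm" (PySem.Str.lower h) && PySem.Str.isIn "international" (PySem.Str.lower h))
        rank := f.rank || hs.any (fun h => PySem.Str.isIn "rank" (PySem.Str.lower h))
        ov := f.ov || hs.any (fun h => PySem.Str.isIn "ov" (PySem.Str.lower h) || PySem.Str.isIn "organization" (PySem.Str.lower h))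
        sponsor := f.sponsor || hs.any (fun h => PySem.Str.isIn "sponsor" (PySem.Str.lower h))
        vpPp := f.vpPp || hs.any (fun h => PySem.Str.isIn "vp" (PySem.Str.lower h) || PySem.Str.isIn "pp" (PySem.Str.lower h))
        lr := f.lr || hs.any (fun h => PySem.Str.isIn "lr" (PySem.Str.lower h))
        vorwerk := f.vorwerk || hs.any (fun h => PySem.Str.isIn "vorwerk" (PySem.Str.lower h)) } := by
  induction hs generalizing f with
  | nil => simp
  | cons h t ih => simp [ih, dcStep, Bool.or_assoc]

/-- 'punkte' and 'points' each contain 'p', so the three-way test collapses to 'p'. -/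
theorem p_absorb (s : String) :
    (PySem.Str.isIn "punkte" s || PySem.Str.isIn "points" s || PySem.Str.isIn "p" s) = PySem.Str.isIn "p" s := by
  cases hp : PySem.Str.isIn "p" s with
  | true => simp
  | false =>
    have hni : ¬ ("p".toList <:+: s.toList) := by
      intro h
      rw [(PySem.Str.isIn_iff_infix _ _).mpr h] at hp
      exact absurd hp (by simp)
    have h1 : PySem.Str.isIn "punkte" s = false := by
      apply Bool.eq_false_iff.mpr; intro h
      exact hni (List.IsInfix.trans (by decide) ((PySem.Str.isIn_iff_infix _ _).mp h))
    have h2 : PySem.Str.isIn "points" s = false := by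
      apply Bool.eq_false_iff.mpr; intro h
      exact hni (List.IsInfix.trans (by decide) ((PySem.Str.isIn_iff_infix _ _).mp h))
    rw [h1, h2]; rfl

/-- The two decision shapes agree as Boolean functions. -/
theorem decision_eq (a b c p m r o sp v l w : Bool) :
    (if a && b then "zinzino"
     else if c && p then "pm-international"
     else if m then "pm-international"
     else if r && o then "doterra"
     else if sp && v then "herbalife"
     else if l then "lr"
     else if w then "vorwerk"
     else "generic") =
    (if a && b then "zinzino"
     else if (c && p) || m then "pm-international"
     else if r && o then "doterra"
     else if sp && v then "herbalife"
     else if l then "lr"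
     else if w then "vorwerk"
     else "generic") := by
  cases c <;> cases p <;> cases m <;> simp

-- ===== VERDICT (by name: the statement is the Claim_ definition above) =====
theorem detect_company_spec : Claim_equal_detect_company := by
  intro headers _
  unfold Spec_detect_company detect_company detect_company_alt
  rw [dcFold]
  simp only [List.any_map, Function.comp_def, Bool.false_or]
  rw [show (fun h => PySem.Str.isIn "punkte" (PySem.Str.lower h) || PySem.Str.isIn "points" (PySem.Str.lower h) || PySem.Str.isIn "p" (PySem.Str.lower h)) = (fun h => PySem.Str.isIn "p" (PySem.Str.lower h)) from funext (fun h => p_absorb _)]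
  exact decision_eq _ _ _ _ _ _ _ _ _ _ _
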